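-- pv_equiv track=rewrite | github.com/Asia122/booking-pass | fiscal_code.py | get_name_letters
-- ===== SOURCE A (Python) =====
-- def get_name_letters(name):
--     """
--     This funciton returns the second 3 letters
--     of the Italian fiscal code as string.
--     The first three consonants of the name are used.
--     If the name has less than 3 consonants,
--     then vowels will replace the blank spaces.
--     If the whole name has less than 3 letters,
--     the blank spaces are filled with an X.
--     If the name has more than 3 consonants,
--     the 2nd is skipped.
--     """
--
--     name = name.upper()
--     result = ""
--     vowels = "AEIOU"
--     consonants = "BCDFGHJKLMNPQRSTVWXYZ"
--     to_analyze = 0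
--     still_consonants = True
--     still_vowels = True
--
--     while len(result) < 4:
--         if still_consonants:
--             if name[to_analyze] in consonants:
--                 result += name[to_analyze]
--         elif still_vowels:
--             if name[to_analyze] in vowels:
--                 result += name[to_analyze]
--         else:
--             result += "X"
--
--         if to_analyze + 1 != len(name):
--             to_analyze += 1
--         elif to_analyze + 1 == len(name) and still_consonants:
--             to_analyze = 0
--             still_consonants = False
--         else:
--             still_vowels = False
--
--     if consonants_counter(name) > 3:
--         result = result[0] + result[2:4]
--     else:
--         result = result[:3]
--
--     return result
--
-- def consonants_counter(word):
--     """
--     This function returns the number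
--     of consonants in a word.
--     In the program is used by the function
--     that returns the letters to insert in
--     the Italian fiscal code due to the
--     second-consonant skipping rule.
--     """
--
--     consonants = "BCDFGHJKLMNPQRSTVWXYZ"
--     result = 0
--
--     for letter in word.upper():
--         if letter in consonants:
--             result += 1
--
--     return result
-- ===== SOURCE B (Python) =====
-- def get_name_letters(name):
--     """Filter-based rewrite: two filtering passes build the consonant and
--     vowel lists, then the result is assembled directly (skip-2nd-consonant
--     rule when more than 3 consonants, else pad with vowels and X)."""
--     up = name.upper()
--     cons = [c for c in up if c in "BCDFGHJKLMNPQRSTVWXYZ"]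
--     if len(cons) > 3:
--         return cons[0] + cons[2] + cons[3]
--     vows = [c for c in up if c in "AEIOU"]
--     return ''.join((cons + vows + ['X', 'X', 'X'])[:3])
-- ===== Notes on version B (the rewrite author's own statement) =====
-- stated objective: simpler
-- what changed: Replaced the while-loop state machine (index resets, still_consonants/still_vowels flags, X-padding loop, and the separate consonants_counter helper) by two filtering passes that build the consonant and vowel lists and assemble the result directly.
import Mathlib
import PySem

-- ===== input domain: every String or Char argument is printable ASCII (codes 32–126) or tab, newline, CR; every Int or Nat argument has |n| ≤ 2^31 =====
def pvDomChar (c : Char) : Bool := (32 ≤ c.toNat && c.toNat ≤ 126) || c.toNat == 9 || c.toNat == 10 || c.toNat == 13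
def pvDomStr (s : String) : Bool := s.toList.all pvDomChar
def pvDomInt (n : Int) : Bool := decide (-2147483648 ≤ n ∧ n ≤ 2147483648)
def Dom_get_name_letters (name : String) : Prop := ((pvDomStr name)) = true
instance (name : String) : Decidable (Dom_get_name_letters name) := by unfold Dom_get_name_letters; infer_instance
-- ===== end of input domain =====

-- B replaces A's while-loop state machine by two filtering passes and direct assembly (objective: simpler).

-- ===== PORT A =====

-- the string constants of A, as character lists
def pvVows : List Char := "AEIOU".toList
def pvConsonants : List Char := "BCDFGHJKLMNPQRSTVWXYZ".toList

-- helper consonants_counter of A: counts consonants in word.upper()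
def consonants_counter (word : String) : Int :=
  (PySem.Chars.upper word.toList).foldl
    (fun result letter => if letter ∈ pvConsonants then result + 1 else result) 0

-- the while-loop of A, with fuel (the Python loop terminates on every non-empty
-- name; get_name_letters supplies fuel 2*len+8, enough on every Pre_ input).
-- name[to_analyze] is ported as getD: under Pre_ the index is always in range.
def pvLoopA (name : List Char) : Nat → List Char → Nat → Bool → Bool → List Char
  | 0, result, _, _, _ => result
  | fuel+1, result, to_analyze, still_consonants, still_vowels =>
    if result.length < 4 then
      let c := name.getD to_analyze 'X'
      let result' :=
        if still_consonants then (if c ∈ pvConsonants then result ++ [c] else result)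
        else if still_vowels then (if c ∈ pvVows then result ++ [c] else result)
        else result ++ ['X']
      if to_analyze + 1 ≠ name.length then
        pvLoopA name fuel result' (to_analyze + 1) still_consonants still_vowels
      else if still_consonants then
        pvLoopA name fuel result' 0 false still_vowels
      else
        pvLoopA name fuel result' to_analyze still_consonants false
    else result

def get_name_letters (name : String) : String :=
  let nameU := PySem.Chars.upper name.toList
  let result := pvLoopA nameU (2 * nameU.length + 8) [] 0 true true
  -- result[0] is ported as take 1 (identical whenever result ≠ [], which holds on every Pre_ input reaching this branch)
  let result2 :=
    if consonants_counter (String.ofList nameU) > 3 then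
      result.take 1 ++ PySem.List.slice result (some 2) (some 4)
    else
      PySem.List.slice result none (some 3)
  String.ofList result2

-- ===== PORT B =====
def get_name_letters_alt (name : String) : String :=
  let up := PySem.Chars.upper name.toList
  let cons := up.filter (fun c => c ∈ pvConsonants)
  if cons.length > 3 then
    String.ofList [cons.getD 0 'X', cons.getD 2 'X', cons.getD 3 'X']
  else
    let vows := up.filter (fun c => c ∈ pvVows)
    String.ofList ((cons ++ vows ++ ['X', 'X', 'X']).take 3)

-- ===== PRECONDITION & SPEC =====
-- Pre_ excludes only the empty string, on which A raises IndexError (name[0]).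
def Pre_get_name_letters (name : String) : Prop := name ≠ ""
instance (name : String) : Decidable (Pre_get_name_letters name) := by unfold Pre_get_name_letters; infer_instance
def pvWitness_get_name_letters : String := "Mario"

def Spec_get_name_letters (name : String) (out : String) : Prop := out = get_name_letters_alt name
instance (name : String) (out : String) : Decidable (Spec_get_name_letters name out) := by unfold Spec_get_name_letters; infer_instance

-- ===== CLAIM (what is proved, stated in full; the proofs are below) =====
def Claim_equal_get_name_letters : Prop := ∀ (name : String), Dom_get_name_letters name → Pre_get_name_letters name → Spec_get_name_letters name (get_name_letters name)

-- ===== LEMMAS AND PROOFS =====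

-- PySem.Chars.upperChar is idempotent (A's helper re-uppercases the already uppercased name)
theorem pv_upperChar_idem (c : Char) : PySem.Chars.upperChar (PySem.Chars.upperChar c) = PySem.Chars.upperChar c := by
  unfold PySem.Chars.upperChar PySem.Chars.islower
  split_ifs with h1 h2 <;> try rfl
  exfalso
  simp only [Bool.and_eq_true, decide_eq_true_eq, Char.le_def, UInt32.le_iff_toNat_le] at h1 h2
  have e1 : 'a'.val.toNat = 97 := rfl
  have e2 : 'z'.val.toNat = 122 := rfl
  have hval : (Char.ofNat (c.toNat - 32)).toNat = c.toNat - 32 := by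
    rw [Char.toNat_ofNat, if_pos]
    left
    simp only [Char.toNat] at *
    omega
  simp only [Char.toNat] at *
  omega

theorem pv_upper_idem (l : List Char) : PySem.Chars.upper (PySem.Chars.upper l) = PySem.Chars.upper l := by
  simp [PySem.Chars.upper, Function.comp, pv_upperChar_idem]

-- A's helper counts exactly the consonants of the (already upper) list
theorem pv_counter_eq (u : List Char) :
    consonants_counter (String.ofList (PySem.Chars.upper u)) =
      ((PySem.Chars.upper u).filter (fun c => c ∈ pvConsonants)).length := by
  unfold consonants_counter
  have h0 : (String.ofList (PySem.Chars.upper u)).toList = PySem.Chars.upper u := by simp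
  rw [h0, pv_upper_idem]
  have hfc := PySem.List.foldl_count_if (fun c => decide (c ∈ pvConsonants)) (PySem.Chars.upper u) 0
  simpa [List.countP_eq_length_filter] using hfc

-- take 4 of a padded list, when the prefix is short
theorem pv_pad4 (l : List Char) (h : l.length ≤ 4) :
    (l ++ List.replicate 4 'X').take 4 = l ++ List.replicate (4 - l.length) 'X' := by
  rw [List.take_append, List.take_of_length_le h, List.take_replicate]
  have hm : min (4 - l.length) 4 = 4 - l.length := by omega
  rw [hm]

-- phase 3: both scan flags are off, the loop pads with 'X' up to length 4
theorem pv_loop3 (name : List Char) :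
    ∀ fuel result ta, result.length ≤ 4 → 4 - result.length ≤ fuel →
      pvLoopA name fuel result ta false false = result ++ List.replicate (4 - result.length) 'X' := by
  intro fuel
  induction fuel with
  | zero =>
    intro result ta h1 h2
    have : result.length = 4 := by omega
    simp [pvLoopA, this]
  | succ fuel ih =>
    intro result ta h1 h2
    rw [pvLoopA]
    by_cases hlt : result.length < 4
    · rw [if_pos hlt]
      simp only [Bool.false_eq_true, if_false]
      have hr : (result ++ ['X']).length ≤ 4 := by simp; omega
      have hf : 4 - (result ++ ['X']).length ≤ fuel := by simp; omega
      have hrep : (result ++ ['X']) ++ List.replicate (4 - (result ++ ['X']).length) 'X'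
          = result ++ List.replicate (4 - result.length) 'X' := by
        have h4 : 4 - result.length = (4 - (result ++ ['X']).length) + 1 := by simp; omega
        rw [h4, List.replicate_succ, List.append_assoc]
        rfl
      split_ifs with hta
      · rw [ih _ _ hr hf, hrep]
      · rw [ih _ _ hr hf, hrep]
    · rw [if_neg hlt]
      have : result.length = 4 := by omega
      simp [this]

-- phase 2: consonant scan done, the loop appends the vowels of the rest, then pads
theorem pv_loop2 (name : List Char) :
    ∀ fuel ta result, ta < name.length → result.length ≤ 4 → name.length - ta + 4 ≤ fuel →
      pvLoopA name fuel result ta false true =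
        (result ++ (name.drop ta).filter (fun c => c ∈ pvVows) ++ List.replicate 4 'X').take 4 := by
  intro fuel
  induction fuel with
  | zero => intro ta result h0 h1 h2; omega
  | succ fuel ih =>
    intro ta result hta h1 h3
    rw [pvLoopA]
    by_cases hlt : result.length < 4
    · rw [if_pos hlt]
      simp only [Bool.false_eq_true, if_false, if_true]
      have hget : name.getD ta 'X' = name[ta] := List.getD_eq_getElem name 'X' hta
      have hdrop : name.drop ta = name[ta] :: name.drop (ta + 1) := List.drop_eq_getElem_cons hta
      rw [hget, hdrop]
      by_cases hend : ta + 1 ≠ name.length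
      · have hta' : ta + 1 < name.length := by omega
        rw [if_pos hend]
        by_cases hv : name[ta] ∈ pvVows
        · rw [if_pos hv, ih (ta + 1) (result ++ [name[ta]]) hta' (by simp; omega) (by omega)]
          simp only [List.filter_cons, hv, decide_true, if_true, List.append_assoc,
            List.cons_append, List.nil_append]
        · rw [if_neg hv, ih (ta + 1) result hta' h1 (by omega)]
          simp only [List.filter_cons, hv, decide_false, Bool.false_eq_true, if_false, List.append_assoc]
      · rw [if_neg hend]
        simp only [ne_eq, not_not] at hend
        have hdrop1 : name.drop (ta + 1) = [] := by
          apply List.drop_eq_nil_of_le; omega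
        by_cases hv : name[ta] ∈ pvVows
        · have hr : (result ++ [name[ta]]).length ≤ 4 := by simp; omega
          rw [if_pos hv, pv_loop3 name fuel _ ta hr (by simp; omega), hdrop1]
          have hf : List.filter (fun c => decide (c ∈ pvVows)) [name[ta]] = [name[ta]] := by
            simp [hv]
          rw [hf]
          exact (pv_pad4 _ hr).symm
        · rw [if_neg hv, pv_loop3 name fuel result ta h1 (by omega), hdrop1]
          have hf : List.filter (fun c => decide (c ∈ pvVows)) [name[ta]] = [] := by
            simp [hv]
          rw [hf, List.append_nil]
          exact (pv_pad4 _ h1).symm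
    · rw [if_neg hlt]
      have h4 : result.length = 4 := by omega
      rw [List.append_assoc, List.take_append, List.take_of_length_le (le_of_eq h4)]
      simp [h4]

-- phase 1: the loop appends the consonants of the rest, then all vowels, then pads
theorem pv_loop1 (name : List Char) :
    ∀ fuel ta result, ta < name.length → result.length ≤ 4 →
        (name.length - ta) + name.length + 4 ≤ fuel →
      pvLoopA name fuel result ta true true =
        (result ++ (name.drop ta).filter (fun c => c ∈ pvConsonants)
          ++ name.filter (fun c => c ∈ pvVows) ++ List.replicate 4 'X').take 4 := by
  intro fuel
  induction fuel with
  | zero => intro ta result h0 h1 h2; omega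
  | succ fuel ih =>
    intro ta result hta h1 h3
    rw [pvLoopA]
    by_cases hlt : result.length < 4
    · rw [if_pos hlt]
      simp only [if_true]
      have hget : name.getD ta 'X' = name[ta] := List.getD_eq_getElem name 'X' hta
      have hdrop : name.drop ta = name[ta] :: name.drop (ta + 1) := List.drop_eq_getElem_cons hta
      rw [hget, hdrop]
      by_cases hend : ta + 1 ≠ name.length
      · have hta' : ta + 1 < name.length := by omega
        rw [if_pos hend]
        by_cases hv : name[ta] ∈ pvConsonants
        · rw [if_pos hv, ih (ta + 1) (result ++ [name[ta]]) hta' (by simp; omega) (by omega)]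
          simp only [List.filter_cons, hv, decide_true, if_true, List.append_assoc,
            List.cons_append, List.nil_append]
        · rw [if_neg hv, ih (ta + 1) result hta' h1 (by omega)]
          simp only [List.filter_cons, hv, decide_false, Bool.false_eq_true, if_false,
            List.append_assoc]
      · rw [if_neg hend]
        simp only [ne_eq, not_not] at hend
        have h0 : 0 < name.length := by omega
        have hdrop1 : name.drop (ta + 1) = [] := by
          apply List.drop_eq_nil_of_le; omega
        have hdrop0 : name.drop 0 = name := List.drop_zero
        by_cases hv : name[ta] ∈ pvConsonants
        · have hr : (result ++ [name[ta]]).length ≤ 4 := by simp; omega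
          rw [if_pos hv, pv_loop2 name fuel 0 _ h0 hr (by omega), hdrop1, hdrop0]
          have hf : List.filter (fun c => decide (c ∈ pvConsonants)) [name[ta]] = [name[ta]] := by
            simp [hv]
          rw [hf]
        · rw [if_neg hv, pv_loop2 name fuel 0 result h0 h1 (by omega), hdrop1, hdrop0]
          have hf : List.filter (fun c => decide (c ∈ pvConsonants)) [name[ta]] = [] := by
            simp [hv]
          rw [hf, List.append_nil]
    · rw [if_neg hlt]
      have h4 : result.length = 4 := by omega
      rw [List.append_assoc, List.append_assoc, List.take_append,
        List.take_of_length_le (le_of_eq h4)]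
      simp [h4]

theorem pv_loop_main (name : List Char) (h : name ≠ []) :
    pvLoopA name (2 * name.length + 8) [] 0 true true =
      (name.filter (fun c => c ∈ pvConsonants) ++ name.filter (fun c => c ∈ pvVows)
        ++ List.replicate 4 'X').take 4 := by
  have hl : 0 < name.length := List.length_pos_iff.mpr h
  simpa using pv_loop1 name (2 * name.length + 8) 0 [] hl (by simp) (by omega)

-- ===== VERDICT (by name: the statement is the Claim_ definition above) =====
theorem pv_take3_pad (L : List Char) :
    (L ++ List.replicate 4 'X').take 3 = (L ++ ['X', 'X', 'X']).take 3 := by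
  have h3 : (['X', 'X', 'X'] : List Char) = List.replicate 3 'X' := rfl
  rw [h3, List.take_append, List.take_append, List.take_replicate, List.take_replicate]
  have hm : min (3 - L.length) 4 = min (3 - L.length) 3 := by omega
  rw [hm]

theorem get_name_letters_spec : Claim_equal_get_name_letters := by
  intro name hdom hpre
  unfold Spec_get_name_letters
  simp only [get_name_letters, get_name_letters_alt]
  have hne : PySem.Chars.upper name.toList ≠ [] := by
    intro h
    apply hpre
    unfold PySem.Chars.upper at h
    rw [List.map_eq_nil_iff] at h
    exact String.ext (by simp [h])
  rw [pv_loop_main _ hne, pv_counter_eq]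
  set u := PySem.Chars.upper name.toList with hu
  set cons := u.filter (fun c => c ∈ pvConsonants) with hcons
  set vows := u.filter (fun c => c ∈ pvVows) with hvows
  clear_value u cons vows
  by_cases ht : cons.length > 3
  · rw [if_pos (by exact_mod_cast ht), if_pos ht]
    rcases cons with _ | ⟨a, _ | ⟨b, _ | ⟨c, _ | ⟨d, t⟩⟩⟩⟩ <;> simp at ht
    have htake : ((a :: b :: c :: d :: t) ++ vows ++ List.replicate 4 'X').take 4
        = [a, b, c, d] := by
      simp [List.take_append]
    rw [htake]
    simp [PySem.List.slice, PySem.List.clampIdx]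
  · rw [if_neg (by exact_mod_cast ht), if_neg ht]
    rw [PySem.List.slice_to _ (by norm_num : (0:Int) ≤ 3)]
    rw [show ((3:Int)).toNat = 3 from rfl, List.take_take]
    exact congrArg _ (pv_take3_pad (cons ++ vows))
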